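-- pv_equiv track=rewrite | github.com/Astropilot/AdventOfCode | aoc_2015/day5/part1.py | is_word_nice
-- ===== SOURCE A (Python) =====
-- def is_word_nice(word: str) -> bool:
--     vowels = 0
--     twice_in_row = False
--
--     for i, c in enumerate(word):
--         if c in "aeiou":
--             vowels += 1
--         if i + 1 < len(word):
--             if c == word[i + 1]:
--                 twice_in_row = True
--             if c + word[i + 1] in ("ab", "cd", "pq", "xy"):
--                 return False
--     return vowels >= 3 and twice_in_row
-- ===== SOURCE B (Python) =====
-- def is_word_nice(word: str) -> bool:
--     enough_vowels = sum(c in "aeiou" for c in word) >= 3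
--     has_double = any(a == b for a, b in zip(word, word[1:]))
--     clean = not any(s in word for s in ("ab", "cd", "pq", "xy"))
--     return enough_vowels and has_double and clean
-- ===== Notes on version B (the rewrite author's own statement) =====
-- stated objective: idiomatic
-- what changed: A's single fused index loop with early return is replaced by three independent whole-string passes (a 0/1 vowel sum, an adjacent-pair any over zip(word, word[1:]), and substring tests for the four forbidden pairs) combined with one final and.
import Mathlib
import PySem

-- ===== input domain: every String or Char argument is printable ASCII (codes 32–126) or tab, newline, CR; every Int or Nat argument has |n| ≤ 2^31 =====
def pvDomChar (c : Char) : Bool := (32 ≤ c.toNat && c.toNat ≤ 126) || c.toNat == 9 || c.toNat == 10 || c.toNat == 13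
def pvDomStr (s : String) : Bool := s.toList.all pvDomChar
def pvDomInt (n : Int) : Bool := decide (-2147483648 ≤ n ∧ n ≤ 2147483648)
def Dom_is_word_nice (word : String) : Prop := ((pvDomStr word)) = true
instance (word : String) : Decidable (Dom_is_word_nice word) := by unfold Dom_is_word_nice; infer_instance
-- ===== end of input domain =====

-- B replaces A's single fused index loop (with early return) by three independent
-- whole-string passes combined with one final conjunction (idiomatic decomposition).


-- ===== PORT A =====
-- the loop over enumerate(word): current char c, lookahead word[i+1] when it exists;
-- 'c + word[i+1] in ("ab","cd","pq","xy")' is the 2-char string represented as its char pair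
def isWordNiceLoop : List Char → Int → Bool → Bool
  | [], vowels, twice => decide (3 ≤ vowels) && twice
  | c :: rest, vowels, twice =>
    let vowels := if "aeiou".toList.contains c then vowels + 1 else vowels
    match rest with
    | [] => decide (3 ≤ vowels) && twice
    | d :: _ =>
      let twice := if c == d then true else twice
      if (c, d) ∈ [('a','b'), ('c','d'), ('p','q'), ('x','y')] then false
      else isWordNiceLoop rest vowels twice

def is_word_nice (word : String) : Bool :=
  isWordNiceLoop word.toList 0 false

-- ===== PORT B =====
-- three independent passes: a 0/1 sum over the chars (= countP), an any over
-- zip(word, word[1:]), and 's in word' for each forbidden pair via PySem.Str.isIn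
def is_word_nice_alt (word : String) : Bool :=
  let cs := word.toList
  let enoughVowels := decide (3 ≤ (cs.countP (fun c => "aeiou".toList.contains c) : Int))
  let hasDouble := (cs.zip (cs.drop 1)).any (fun p => p.1 == p.2)
  let clean := !(["ab", "cd", "pq", "xy"].any (fun s => PySem.Str.isIn s word))
  enoughVowels && hasDouble && clean

-- ===== PRECONDITION & SPEC =====
def Spec_is_word_nice (word : String) (out : Bool) : Prop := out = is_word_nice_alt word
instance (word : String) (out : Bool) : Decidable (Spec_is_word_nice word out) := by unfold Spec_is_word_nice; infer_instance

-- ===== CLAIM (what is proved, stated in full; the proofs are below) =====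
def Claim_equal_is_word_nice : Prop := ∀ (word : String), Dom_is_word_nice word → Spec_is_word_nice word (is_word_nice word)

-- ===== LEMMAS AND PROOFS =====

def pvForb (p : Char × Char) : Bool := decide (p ∈ [('a','b'), ('c','d'), ('p','q'), ('x','y')])

theorem pv_loop_cons1 (c : Char) (v : Int) (t : Bool) :
    isWordNiceLoop [c] v t
      = (decide (3 ≤ (if "aeiou".toList.contains c then v + 1 else v)) && t) := rfl

theorem pv_loop_cons2 (c d : Char) (r2 : List Char) (v : Int) (t : Bool) :
    isWordNiceLoop (c :: d :: r2) v t
      = (if (c, d) ∈ [('a','b'), ('c','d'), ('p','q'), ('x','y')] then false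
         else isWordNiceLoop (d :: r2)
                (if "aeiou".toList.contains c then v + 1 else v)
                (if c == d then true else t)) := rfl

-- a 2-char substring occurs iff its char pair is an adjacent pair
theorem pv_infix_pair (a b : Char) : ∀ (cs : List Char),
    ([a, b] <:+: cs) ↔ (a, b) ∈ cs.zip (cs.drop 1) := by
  intro cs
  induction cs with
  | nil => simp
  | cons c rest ih =>
    cases rest with
    | nil => simp [List.infix_cons_iff, List.cons_prefix_cons]
    | cons d r2 =>
      simp only [List.infix_cons_iff, List.cons_prefix_cons, ih, List.drop_succ_cons,
        List.drop_zero, List.zip_cons_cons, List.mem_cons, Prod.mk.injEq, List.nil_prefix,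
        and_true]

theorem pv_loop_eq : ∀ (cs : List Char) (v : Int) (t : Bool),
    isWordNiceLoop cs v t =
      if (cs.zip (cs.drop 1)).any pvForb then false
      else (decide (3 ≤ v + (cs.countP (fun c => "aeiou".toList.contains c) : Int))
            && (t || (cs.zip (cs.drop 1)).any (fun p => p.1 == p.2))) := by
  intro cs
  induction cs with
  | nil => intro v t; simp [isWordNiceLoop]
  | cons c rest ih =>
    intro v t
    cases rest with
    | nil =>
      rw [pv_loop_cons1]
      simp only [List.drop_succ_cons, List.drop_nil, List.zip_nil_right, List.any_nil,
        Bool.false_eq_true, if_false, Bool.or_false, List.countP_cons, List.countP_nil]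
      congr 1
      rw [decide_eq_decide]
      rcases Bool.eq_false_or_eq_true ("aeiou".toList.contains c) with hv | hv <;>
        rw [hv] <;> simp only [if_true, Bool.false_eq_true, if_false] <;> push_cast <;> omega
    | cons d r2 =>
      rw [pv_loop_cons2]
      by_cases hf : (c, d) ∈ [('a','b'), ('c','d'), ('p','q'), ('x','y')]
      · have hc : ((c :: d :: r2).zip ((c :: d :: r2).drop 1)).any pvForb = true := by
          simp [pvForb, hf]
        rw [if_pos hf, hc, if_pos rfl]
      · have hcd : pvForb (c, d) = false := by simp [pvForb, hf]
        rw [if_neg hf, ih]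
        simp only [List.drop_succ_cons, List.drop_zero, List.zip_cons_cons, List.any_cons,
          hcd, Bool.false_or]
        rcases Bool.eq_false_or_eq_true (((d :: r2).zip r2).any pvForb) with hp | hp <;>
          simp only [hp, if_true, Bool.false_eq_true, if_false]
        congr 1
        · rw [decide_eq_decide]
          simp only [List.countP_cons]
          rcases Bool.eq_false_or_eq_true ("aeiou".toList.contains c) with hv | hv <;>
            rw [hv] <;> simp only [if_true, Bool.false_eq_true, if_false] <;> push_cast <;> omega
        · by_cases hd : (c == d) = true <;> simp [hd]

-- the four substring tests, combined, are the any-over-adjacent-pairs test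
theorem pv_clean_eq (word : String) :
    (["ab", "cd", "pq", "xy"].any (fun s => PySem.Str.isIn s word))
      = ((word.toList.zip (word.toList.drop 1)).any pvForb) := by
  rcases Bool.eq_false_or_eq_true ((word.toList.zip (word.toList.drop 1)).any pvForb)
    with h | h <;> rw [h]
  · rw [List.any_eq_true]
    rw [List.any_eq_true] at h
    rcases h with ⟨⟨a, b⟩, hp, hfp⟩
    have hin : [a, b] <:+: word.toList := (pv_infix_pair a b _).mpr hp
    simp only [pvForb, List.mem_cons, decide_eq_true_eq, List.not_mem_nil, or_false,
      Prod.mk.injEq] at hfp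
    rcases hfp with ⟨rfl, rfl⟩ | ⟨rfl, rfl⟩ | ⟨rfl, rfl⟩ | ⟨rfl, rfl⟩
    · exact ⟨"ab", by simp, by rw [PySem.Str.isIn_iff_infix]; exact hin⟩
    · exact ⟨"cd", by simp, by rw [PySem.Str.isIn_iff_infix]; exact hin⟩
    · exact ⟨"pq", by simp, by rw [PySem.Str.isIn_iff_infix]; exact hin⟩
    · exact ⟨"xy", by simp, by rw [PySem.Str.isIn_iff_infix]; exact hin⟩
  · rw [List.any_eq_false]
    intro s hs hin
    rw [PySem.Str.isIn_iff_infix] at hin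
    rw [List.any_eq_false] at h
    fin_cases hs
    · exact h _ ((pv_infix_pair 'a' 'b' _).mp hin) (by simp [pvForb])
    · exact h _ ((pv_infix_pair 'c' 'd' _).mp hin) (by simp [pvForb])
    · exact h _ ((pv_infix_pair 'p' 'q' _).mp hin) (by simp [pvForb])
    · exact h _ ((pv_infix_pair 'x' 'y' _).mp hin) (by simp [pvForb])

-- ===== VERDICT (by name: the statement is the Claim_ definition above) =====
theorem is_word_nice_spec : Claim_equal_is_word_nice := by
  intro word _
  unfold Spec_is_word_nice is_word_nice is_word_nice_alt
  rw [pv_loop_eq, pv_clean_eq]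
  rcases Bool.eq_false_or_eq_true ((word.toList.zip (word.toList.drop 1)).any pvForb)
    with h | h <;> rw [h]
  · simp
  · simp
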